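-- pv_equiv track=rewrite | github.com/tetraliane/todo | todo/parser.py | parse_editor
-- ===== SOURCE A (Python) =====
-- def parse_editor(text: str) -> tuple[str, str, str, str]:
--     title = ""
--     group = ""
--     due_date = ""
--     comment = ""
--
--     reading_header = True
--     for i, raw_line in enumerate(text.splitlines()):
--         line = raw_line.split("//")[0].strip()
--
--         if reading_header:
--             if raw_line.strip() == "" and title != "":
--                 reading_header = False
--                 continue
--             elif title == "":
--                 title = line
--             elif line.startswith("#"):
--                 group = line[1:].strip()
--             elif line.startswith("?"):
--                 due_date = line[1:].strip()
--             else: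
--                 e = SyntaxError(
--                     'Expected "#", "?" or an empty line, but got `{}`'.format(raw_line)
--                 )
--                 e.filename = "<editor>"
--                 e.lineno = i + 1
--                 e.offset = 1
--                 e.text = raw_line
--                 e.end_lineno = i + 1
--                 e.end_offset = len(raw_line)
--                 raise e
--         else:
--             comment = comment + "\n" + line
--
--     if title == "":
--         e = SyntaxError("Title is not given.")
--         e.filename = "<editor>"
--         e.lineno = 1
--         e.offset = 1
--         e.text = text
--         e.end_lineno = len(text.splitlines()) if text != "" else 1
--         e.end_offset = len(text.splitlines()[-1]) if text != "" else 1
--         raise e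
--
--     comment = comment.strip()  # removes empty line before and after the comment
--
--     return title, group, due_date, comment
-- ===== SOURCE B (Python) =====
-- def parse_editor(text: str) -> tuple[str, str, str, str]:
--     lines = text.splitlines()
--     clean = [l.split("//")[0].strip() for l in lines]
--     t = next((i for i, c in enumerate(clean) if c != ""), None)
--     if t is None:
--         e = SyntaxError("Title is not given.")
--         e.filename = "<editor>"
--         e.lineno = 1
--         e.offset = 1
--         e.text = text
--         e.end_lineno = len(lines) if text != "" else 1
--         e.end_offset = len(lines[-1]) if text != "" else 1
--         raise e
--     rest = lines[t + 1:]
--     k = next((j for j, r in enumerate(rest) if r.strip() == ""), len(rest))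
--     group = ""
--     due_date = ""
--     for j, c in enumerate(clean[t + 1: t + 1 + k]):
--         if c.startswith("#"):
--             group = c[1:].strip()
--         elif c.startswith("?"):
--             due_date = c[1:].strip()
--         else:
--             i = t + 1 + j
--             e = SyntaxError(
--                 'Expected "#", "?" or an empty line, but got `{}`'.format(lines[i])
--             )
--             e.filename = "<editor>"
--             e.lineno = i + 1
--             e.offset = 1
--             e.text = lines[i]
--             e.end_lineno = i + 1
--             e.end_offset = len(lines[i])
--             raise e
--     comment = "\n".join(clean[t + 1 + k + 1:]).strip()
--     return clean[t], group, due_date, comment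
-- ===== Notes on version B (the rewrite author's own statement) =====
-- stated objective: alternative
-- what changed: Replaces A's single stateful header/comment loop by an index-based decomposition: find the title line (first non-empty cleaned line) and the blank separator line, then parse the header slice, and join-and-strip the comment slice; SyntaxErrors are raised with the same attributes from the recovered original indices.
import Mathlib
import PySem

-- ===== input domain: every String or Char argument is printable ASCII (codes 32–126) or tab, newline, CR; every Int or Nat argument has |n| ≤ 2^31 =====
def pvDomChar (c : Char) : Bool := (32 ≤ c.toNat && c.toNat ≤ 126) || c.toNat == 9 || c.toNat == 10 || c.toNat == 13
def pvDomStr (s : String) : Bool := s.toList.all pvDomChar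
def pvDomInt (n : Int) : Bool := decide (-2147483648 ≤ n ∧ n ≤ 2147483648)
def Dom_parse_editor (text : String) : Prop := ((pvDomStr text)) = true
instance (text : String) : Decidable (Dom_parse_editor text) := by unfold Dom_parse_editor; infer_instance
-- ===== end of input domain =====

-- B replaces A's stateful header/comment loop by an index-based decomposition (find title line,
-- find blank separator, parse the header slice, join-and-strip the comment slice); same values.

-- ===== PORT A =====
-- raw_line.split("//")[0].strip()  (both Pythons contain this exact expression)
def cleanLine (s : String) : String :=
  PySem.Str.strip (((PySem.Str.split? s "//").getD []).headD "")

-- A's for-loop over the lines with state (title, group, due_date, comment, reading_header).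
-- The enumerate index i and raw_line are used by A only inside the raised SyntaxError,
-- which the port represents as `none` (those inputs are excluded by Pre_).
def parseLoopA : List String → String → String → String → String → Bool →
    Option (String × String × String × String)
  | [], title, group, due, comment, _ => some (title, group, due, comment)
  | raw :: rest, title, group, due, comment, readingHeader =>
    let line := cleanLine raw
    if readingHeader then
      if PySem.Str.strip raw = "" ∧ title ≠ "" then
        parseLoopA rest title group due comment false
      else if title = "" then
        parseLoopA rest line group due comment true
      else if PySem.Str.startswith line "#" then
        parseLoopA rest title (PySem.Str.strip (PySem.Str.slice line (some 1) none)) due comment true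
      else if PySem.Str.startswith line "?" then
        parseLoopA rest title group (PySem.Str.strip (PySem.Str.slice line (some 1) none)) comment true
      else none          -- SyntaxError 'Expected "#", "?" or an empty line…'
    else
      parseLoopA rest title group due (comment ++ "\n" ++ line) false

def parse_editor (text : String) : String × String × String × String :=
  match parseLoopA (PySem.Str.splitlines text) "" "" "" "" true with
  | none => ("", "", "", "")                         -- Python raises SyntaxError (outside Pre_)
  | some (title, group, due, comment) =>
    if title = "" then ("", "", "", "")              -- Python raises "Title is not given." (outside Pre_)
    else (title, group, due, PySem.Str.strip comment)

-- ===== PORT B =====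
-- the for j,c loop over the header slice of Source B (error => none, outside Pre_)
def headerFoldB : List String → String → String → Option (String × String)
  | [], g, d => some (g, d)
  | c :: rest, g, d =>
    if PySem.Str.startswith c "#" then
      headerFoldB rest (PySem.Str.strip (PySem.Str.slice c (some 1) none)) d
    else if PySem.Str.startswith c "?" then
      headerFoldB rest g (PySem.Str.strip (PySem.Str.slice c (some 1) none))
    else none

def parse_editor_alt (text : String) : String × String × String × String :=
  let lines := PySem.Str.splitlines text
  let clean := lines.map cleanLine
  match List.findIdx? (fun c => c != "") clean with   -- t = index of the title line
  | none => ("", "", "", "")                          -- "Title is not given." (outside Pre_)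
  | some t =>
    let rest := lines.drop (t + 1)
    let k := (List.findIdx? (fun r => PySem.Str.strip r == "") rest).getD rest.length
    match headerFoldB ((clean.drop (t + 1)).take k) "" "" with
    | none => ("", "", "", "")                        -- SyntaxError (outside Pre_)
    | some gd =>
      (clean.getD t "", gd.1, gd.2,
        PySem.Str.strip (PySem.Str.join "\n" (clean.drop (t + 1 + k + 1))))

-- ===== PRECONDITION & SPEC =====
-- Pre_ excludes exactly the inputs on which Python A raises a SyntaxError: texts with no
-- non-empty cleaned line (no title), and texts whose header block (between the title line and
-- the first whitespace-only line) contains a cleaned line that is neither a group marker nor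
-- a due-date marker.
def Pre_parse_editor (text : String) : Prop :=
  (let lines := PySem.Str.splitlines text
   let clean := lines.map cleanLine
   match List.findIdx? (fun c => c != "") clean with
   | none => false
   | some t =>
     let rest := lines.drop (t + 1)
     ((clean.drop (t + 1)).take
        ((List.findIdx? (fun r => PySem.Str.strip r == "") rest).getD rest.length)).all
       (fun c => PySem.Str.startswith c "#" || PySem.Str.startswith c "?")) = true
instance (text : String) : Decidable (Pre_parse_editor text) := by
  unfold Pre_parse_editor; infer_instance

def pvWitness_parse_editor : String := "buy milk // today\n#errands\n?monday\n\nskimmed\n\nor soy"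

def Spec_parse_editor (text : String) (out : String × String × String × String) : Prop :=
  out = parse_editor_alt text
instance (text : String) (out : String × String × String × String) :
    Decidable (Spec_parse_editor text out) := by unfold Spec_parse_editor; infer_instance

-- ===== CLAIM (what is proved, stated in full; the proofs are below) =====
def Claim_equal_parse_editor : Prop :=
  ∀ (text : String), Dom_parse_editor text → Pre_parse_editor text →
    Spec_parse_editor text (parse_editor text)

-- ===== LEMMAS AND PROOFS =====

-- A's post-loop processing (title check + strip), with `none` for the raising branches
def postA : Option (String × String × String × String) → String × String × String × String
  | none => ("", "", "", "")
  | some (t, g, d, c) => if t = "" then ("", "", "", "") else (t, g, d, PySem.Str.strip c)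

-- B's treatment of the lines after the title line
def hdrRes (l : List String) (title g d : String) : String × String × String × String :=
  let k := (List.findIdx? (fun r => PySem.Str.strip r == "") l).getD l.length
  match headerFoldB ((l.map cleanLine).take k) g d with
  | none => ("", "", "", "")
  | some gd =>
    (title, gd.1, gd.2, PySem.Str.strip (PySem.Str.join "\n" ((l.map cleanLine).drop (k + 1))))

-- B's whole body as a function of the split lines
def altBody (lines : List String) : String × String × String × String :=
  let clean := lines.map cleanLine
  match List.findIdx? (fun c => c != "") clean with
  | none => ("", "", "", "")
  | some t =>
    let rest := lines.drop (t + 1)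
    let k := (List.findIdx? (fun r => PySem.Str.strip r == "") rest).getD rest.length
    match headerFoldB ((clean.drop (t + 1)).take k) "" "" with
    | none => ("", "", "", "")
    | some gd =>
      (clean.getD t "", gd.1, gd.2,
        PySem.Str.strip (PySem.Str.join "\n" (clean.drop (t + 1 + k + 1))))

theorem alt_eq (text : String) :
    parse_editor_alt text = altBody (PySem.Str.splitlines text) := rfl

theorem parse_editor_eq (text : String) :
    parse_editor text = postA (parseLoopA (PySem.Str.splitlines text) "" "" "" "" true) := by
  unfold parse_editor postA
  cases parseLoopA (PySem.Str.splitlines text) "" "" "" "" true with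
  | none => rfl
  | some v => rfl

-- A's comment accumulator "" + "\n" + c₁ + "\n" + ... is "\n".join with "" prepended
theorem foldl_nl_join (cs : List String) (a : String) :
    cs.foldl (fun x y => x ++ "\n" ++ y) a = PySem.Str.join "\n" (a :: cs) := by
  induction cs generalizing a with
  | nil =>
    apply String.toList_inj.mp
    simp [PySem.Str.toList_join, PySem.Chars.join_singleton]
  | cons c cs ih =>
    rw [List.foldl_cons, ih]
    apply String.toList_inj.mp
    cases cs with
    | nil =>
      simp [PySem.Str.toList_join, PySem.Chars.join_singleton, PySem.Chars.join_cons_cons]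
    | cons d ds =>
      simp [PySem.Str.toList_join, PySem.Chars.join_cons_cons]

-- a leading empty piece only contributes a leading '\n', which strip removes
theorem strip_join_empty_cons (cs : List String) :
    PySem.Str.strip (PySem.Str.join "\n" ("" :: cs)) =
      PySem.Str.strip (PySem.Str.join "\n" cs) := by
  cases cs with
  | nil => rfl
  | cons c cs =>
    apply String.toList_inj.mp
    simp only [PySem.Str.toList_strip, PySem.Str.toList_join, List.map_cons,
      PySem.Chars.join_cons_cons]
    have h : String.toList "" = [] := rfl
    have hnl : String.toList "\n" = ['\n'] := rfl
    rw [h, hnl]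
    simp [PySem.Chars.strip, PySem.Chars.lstrip,
      show PySem.Chars.isspace '\n' = true from rfl]

theorem loopA_false (l : List String) (t g d c : String) :
    parseLoopA l t g d c false =
      some (t, g, d, l.foldl (fun a r => a ++ "\n" ++ cleanLine r) c) := by
  induction l generalizing c with
  | nil => rfl
  | cons r rest ih => simp [parseLoopA, ih]

theorem phase2 (l : List String) (title g d : String) (ht : title ≠ "") :
    postA (parseLoopA l title g d "" true) = hdrRes l title g d := by
  induction l generalizing g d with
  | nil =>
    simp [parseLoopA, postA, hdrRes, headerFoldB, ht]
    rfl
  | cons r l ih =>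
    by_cases hb : PySem.Str.strip r = ""
    · rw [show parseLoopA (r :: l) title g d "" true = parseLoopA l title g d "" false by
        simp [parseLoopA, hb, ht]]
      rw [loopA_false]
      have hfold : l.foldl (fun a r => a ++ "\n" ++ cleanLine r) "" =
          PySem.Str.join "\n" ("" :: l.map cleanLine) := by
        rw [← List.foldl_map (f := cleanLine) (g := fun x y => x ++ "\n" ++ y)]
        exact foldl_nl_join _ _
      simp [postA, ht, hfold, strip_join_empty_cons, hdrRes, List.findIdx?_cons, hb,
        headerFoldB]
    · have hk : ∀ (len1 : Nat),
          ((List.findIdx? (fun r => PySem.Str.strip r == "") (r :: l)).getD (len1 + 1)) =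
            ((List.findIdx? (fun r => PySem.Str.strip r == "") l).getD len1) + 1 := by
        intro len1
        rw [List.findIdx?_cons]
        simp [hb]
      by_cases h1 : PySem.Str.startswith (cleanLine r) "#" = true
      · have h1' : PySem.Chars.startswith (cleanLine r).toList ['#'] = true := by
          simpa using h1
        rw [show parseLoopA (r :: l) title g d "" true =
            parseLoopA l title (PySem.Str.strip (PySem.Str.slice (cleanLine r) (some 1) none)) d "" true by
          simp [parseLoopA, hb, ht, h1']]
        rw [ih]
        simp [hdrRes, hk, headerFoldB, h1', List.take_succ_cons, List.drop_succ_cons]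
      · have h1' : PySem.Chars.startswith (cleanLine r).toList ['#'] = false := by
          simpa using h1
        by_cases h2 : PySem.Str.startswith (cleanLine r) "?" = true
        · have h2' : PySem.Chars.startswith (cleanLine r).toList ['?'] = true := by
            simpa using h2
          rw [show parseLoopA (r :: l) title g d "" true =
              parseLoopA l title g (PySem.Str.strip (PySem.Str.slice (cleanLine r) (some 1) none)) "" true by
            simp [parseLoopA, hb, ht, h1', h2']]
          rw [ih]
          simp [hdrRes, hk, headerFoldB, h1', h2', List.take_succ_cons, List.drop_succ_cons]
        · have h2' : PySem.Chars.startswith (cleanLine r).toList ['?'] = false := by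
            simpa using h2
          rw [show parseLoopA (r :: l) title g d "" true = none by
            simp [parseLoopA, hb, ht, h1', h2']]
          simp [hdrRes, hk, headerFoldB, h1', h2', postA, List.take_succ_cons]
  
theorem phase1 (l : List String) :
    postA (parseLoopA l "" "" "" "" true) = altBody l := by
  induction l with
  | nil => rfl
  | cons r l ih =>
    have hstep : parseLoopA (r :: l) "" "" "" "" true =
        parseLoopA l (cleanLine r) "" "" "" true := by
      simp [parseLoopA]
    by_cases hc : cleanLine r = ""
    · rw [hstep, hc, ih]
      -- altBody (r :: l) = altBody l when the new first cleaned line is empty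
      simp only [altBody, List.map_cons, List.findIdx?_cons, hc]
      simp only [show (("" : String) != "") = false from rfl, if_false, Bool.false_eq_true]
      cases hfi : List.findIdx? (fun c => c != "") (l.map cleanLine) with
      | none => simp
      | some t =>
        have harith : ∀ k : Nat, t + 1 + k + 1 = t + 1 + 1 + k := fun k => by omega
        simp [List.drop_succ_cons, harith]
    · rw [hstep, phase2 l (cleanLine r) "" "" hc]
      simp only [altBody, List.map_cons, List.findIdx?_cons,
        show (cleanLine r != "") = true by simpa using hc, if_true]
      have harith : ∀ k : Nat, 1 + k = k + 1 := fun k => by omega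
      simp [hdrRes, List.drop_succ_cons, harith]

-- ===== VERDICT (by name: the statement is the Claim_ definition above) =====
theorem parse_editor_spec : Claim_equal_parse_editor := by
  intro text _ _
  unfold Spec_parse_editor
  rw [parse_editor_eq, alt_eq, phase1]
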